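-- pv_equiv track=rewrite | github.com/greddy992/SuddenInsight | utils/GR_Maze_Utils.py | get_runs_to_goal
-- ===== SOURCE A (Python) =====
-- def find_distance_bn_nodes(node1,node2):
--     minl = min(len(node1),len(node2))
--     maxl = max(len(node1),len(node2))
--     counter = 0
--     for i in range(minl):
--         if node1[i] == node2[i]:
--             counter += 1
--         else:
--             break
--     return (maxl - counter) + (minl - counter)
--
-- def get_runs_to_goal(nodes,goal,thresh = 0):
--     seqs = []
--     for i,s in enumerate(nodes):
--         if s == goal:
--             temp = 0
--             seq = [s]
--             while i-temp > 0 and find_distance_bn_nodes(s,nodes[i-temp-1]) == temp+1 and find_distance_bn_nodes(nodes[i-temp],nodes[i-temp-1])==1: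
--                 seq += [nodes[i-temp-1]]
--                 temp += 1
--             seq = seq[::-1]
--             if len(seq) > thresh + 1:
--                 seqs += [seq]
--     return seqs
-- ===== SOURCE B (Python) =====
-- def find_distance_bn_nodes(node1, node2):
--     minl = min(len(node1), len(node2))
--     maxl = max(len(node1), len(node2))
--     counter = 0
--     for i in range(minl):
--         if node1[i] == node2[i]:
--             counter += 1
--         else:
--             break
--     return (maxl - counter) + (minl - counter)
--
-- def get_runs_to_goal(nodes, goal, thresh=0):
--     # Forward DP: precompute distances once, then a single scan maintaining
--     # the length r of the monotone run ending at the current index.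
--     n = len(nodes)
--     g = [find_distance_bn_nodes(goal, x) for x in nodes]
--     c = [find_distance_bn_nodes(nodes[j], nodes[j + 1]) for j in range(n - 1)]
--     seqs = []
--     r = 0
--     for j in range(n):
--         if j > 0 and c[j - 1] == 1 and g[j - 1] == g[j] + 1:
--             r += 1
--         else:
--             r = 0
--         if nodes[j] == goal and r + 1 > thresh + 1:
--             seqs.append(nodes[j - r:j + 1])
--     return seqs
-- ===== Notes on version B (the rewrite author's own statement) =====
-- stated objective: alternative
-- what changed: Replaces A's per-goal backward while-walk (recomputing string distances along each run) with precomputed goal-distance and consecutive-distance arrays plus a single forward DP scan maintaining the current run length, slicing each run out directly.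
import Mathlib
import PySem

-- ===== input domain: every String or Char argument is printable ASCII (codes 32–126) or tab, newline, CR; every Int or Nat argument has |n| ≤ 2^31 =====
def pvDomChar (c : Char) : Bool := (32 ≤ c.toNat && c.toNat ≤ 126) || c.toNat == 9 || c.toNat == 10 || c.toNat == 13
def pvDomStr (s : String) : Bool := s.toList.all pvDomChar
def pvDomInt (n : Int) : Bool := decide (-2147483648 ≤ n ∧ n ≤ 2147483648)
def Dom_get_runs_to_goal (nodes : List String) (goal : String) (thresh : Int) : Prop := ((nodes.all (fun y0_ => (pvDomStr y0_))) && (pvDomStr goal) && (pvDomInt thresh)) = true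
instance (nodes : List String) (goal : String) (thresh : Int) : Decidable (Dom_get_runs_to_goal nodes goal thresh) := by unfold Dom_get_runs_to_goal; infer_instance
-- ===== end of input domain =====

-- B replaces A's per-goal backward while-walk by precomputed distance arrays and one
-- forward DP scan maintaining the current run length (objective: alternative).

-- ===== PORT A =====
-- for-loop with break over range(minl): structural recursion over the two char lists
-- (stops at the first mismatch or at the end of the shorter list, i.e. at minl)
def fdCounter : List Char → List Char → Nat
  | a :: as, b :: bs => if a = b then 1 + fdCounter as bs else 0
  | _, _ => 0

def find_distance_bn_nodes (node1 node2 : String) : Int :=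
  let minl : Int := min (node1.toList.length : Int) (node2.toList.length : Int)
  let maxl : Int := max (node1.toList.length : Int) (node2.toList.length : Int)
  let counter : Int := (fdCounter node1.toList node2.toList : Int)
  (maxl - counter) + (minl - counter)

-- the while loop of A (indices i-temp-1 / i-temp are always in range under the guard)
def aRun (nodes : List String) (s : String) (i : Nat) (temp : Nat) (seq : List String) :
    List String :=
  if h : 0 < i - temp ∧
      find_distance_bn_nodes s (nodes.getD (i - temp - 1) "") = (temp : Int) + 1 ∧
      find_distance_bn_nodes (nodes.getD (i - temp) "") (nodes.getD (i - temp - 1) "") = 1 then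
    aRun nodes s i (temp + 1) (seq ++ [nodes.getD (i - temp - 1) ""])
  else seq
termination_by i - temp
decreasing_by omega

def get_runs_to_goal (nodes : List String) (goal : String) (thresh : Int) :
    List (List String) :=
  (PySem.List.enumerate nodes 0).foldl
    (fun seqs p =>
      if p.2 = goal then
        let seq := aRun nodes p.2 p.1.toNat 0 [p.2]
        let seq := seq.reverse
        if (seq.length : Int) > thresh + 1 then seqs ++ [seq] else seqs
      else seqs) []

-- ===== PORT B =====
def get_runs_to_goal_alt (nodes : List String) (goal : String) (thresh : Int) :
    List (List String) :=
  let n := nodes.length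
  let g : List Int := nodes.map (fun x => find_distance_bn_nodes goal x)
  let c : List Int := (List.range (n - 1)).map
    (fun j => find_distance_bn_nodes (nodes.getD j "") (nodes.getD (j + 1) ""))
  let res := (List.range n).foldl
    (fun (st : Nat × List (List String)) j =>
      let r := if 0 < j ∧ c.getD (j - 1) 0 = 1 ∧ g.getD (j - 1) 0 = g.getD j 0 + 1
               then st.1 + 1 else 0
      let seqs := if nodes.getD j "" = goal ∧ ((r : Int) + 1 > thresh + 1) then
          -- nodes[j-r : j+1]: both bounds are in range, slice = drop/take
          st.2 ++ [(nodes.drop (j - r)).take (r + 1)]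
        else st.2
      (r, seqs)) (0, [])
  res.2

-- ===== PRECONDITION & SPEC =====
def Spec_get_runs_to_goal (nodes : List String) (goal : String) (thresh : Int) (out : List (List String)) : Prop := out = get_runs_to_goal_alt nodes goal thresh
instance (nodes : List String) (goal : String) (thresh : Int) (out : List (List String)) : Decidable (Spec_get_runs_to_goal nodes goal thresh out) := by unfold Spec_get_runs_to_goal; infer_instance

-- ===== CLAIM (what is proved, stated in full; the proofs are below) =====
def Claim_equal_get_runs_to_goal : Prop := ∀ (nodes : List String) (goal : String) (thresh : Int), Dom_get_runs_to_goal nodes goal thresh → Spec_get_runs_to_goal nodes goal thresh (get_runs_to_goal nodes goal thresh)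

-- ===== LEMMAS AND PROOFS =====

-- distance from the goal to node j
def gD (nodes : List String) (goal : String) (j : Nat) : Int :=
  find_distance_bn_nodes goal (nodes.getD j "")

-- forward DP value: length of the chain ending at index j
def rfun (nodes : List String) (goal : String) : Nat → Nat
  | 0 => 0
  | j + 1 =>
      if find_distance_bn_nodes (nodes.getD j "") (nodes.getD (j + 1) "") = 1 ∧
          gD nodes goal j = gD nodes goal (j + 1) + 1
      then rfun nodes goal j + 1 else 0

-- the backward chain of k nodes strictly below index j, highest first
def desc (nodes : List String) : Nat → Nat → List String
  | _, 0 => []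
  | j, k + 1 => nodes.getD (j - 1) "" :: desc nodes (j - 1) k

lemma fdCounter_symm (as bs : List Char) : fdCounter as bs = fdCounter bs as := by
  induction as generalizing bs with
  | nil => cases bs <;> simp [fdCounter]
  | cons a as ih =>
      cases bs with
      | nil => simp [fdCounter]
      | cons b bs =>
          simp only [fdCounter]
          by_cases h : a = b
          · subst h; simp [ih]
          · rw [if_neg h, if_neg (fun h' => h h'.symm)]

lemma fd_symm (a b : String) :
    find_distance_bn_nodes a b = find_distance_bn_nodes b a := by
  simp [find_distance_bn_nodes, fdCounter_symm, min_comm, max_comm]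

lemma fdCounter_self (l : List Char) : fdCounter l l = l.length := by
  induction l with
  | nil => simp [fdCounter]
  | cons a as ih => simp [fdCounter, ih]; omega

lemma fd_self (a : String) : find_distance_bn_nodes a a = 0 := by
  simp [find_distance_bn_nodes, fdCounter_self]

lemma rfun_le (nodes : List String) (goal : String) (j : Nat) :
    rfun nodes goal j ≤ j := by
  induction j with
  | zero => simp [rfun]
  | succ j ih => simp only [rfun]; split <;> omega

lemma desc_length (nodes : List String) (j k : Nat) : (desc nodes j k).length = k := by
  induction k generalizing j with
  | zero => simp [desc]
  | succ k ih => simp [desc, ih]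

-- A's while loop appends exactly the backward chain of length rfun
lemma aRun_eq (nodes : List String) (goal : String) :
    ∀ (j t i : Nat) (seq : List String), i = j + t → gD nodes goal j = (t : Int) →
      aRun nodes goal i t seq = seq ++ desc nodes j (rfun nodes goal j) := by
  intro j
  induction j with
  | zero =>
      intro t i seq hi _
      rw [aRun]
      simp [hi, rfun, desc]
  | succ j ih =>
      intro t i seq hi hg
      have h1 : i - t - 1 = j := by omega
      have hit : i - t = j + 1 := by omega
      rw [aRun]
      by_cases hc : find_distance_bn_nodes (nodes.getD j "") (nodes.getD (j + 1) "") = 1 ∧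
          gD nodes goal j = gD nodes goal (j + 1) + 1
      · have hcond : 0 < i - t ∧
            find_distance_bn_nodes goal (nodes.getD (i - t - 1) "") = (t : Int) + 1 ∧
            find_distance_bn_nodes (nodes.getD (i - t) "") (nodes.getD (i - t - 1) "") = 1 := by
          refine ⟨by omega, ?_, ?_⟩
          · rw [h1]
            have h2 : gD nodes goal j = (t : Int) + 1 := by rw [hc.2, hg]
            exact h2
          · rw [h1, hit, fd_symm]
            exact hc.1
        rw [dif_pos hcond]
        have hg' : gD nodes goal j = ((t + 1 : Nat) : Int) := by
          rw [hc.2, hg]; push_cast; ring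
        rw [ih (t + 1) i _ (by omega) hg']
        have hr : rfun nodes goal (j + 1) = rfun nodes goal j + 1 := by
          simp only [rfun]; rw [if_pos hc]
        rw [hr, List.append_assoc]
        congr 1
        rw [h1]
        simp [desc]
      · have hcond : ¬ (0 < i - t ∧
            find_distance_bn_nodes goal (nodes.getD (i - t - 1) "") = (t : Int) + 1 ∧
            find_distance_bn_nodes (nodes.getD (i - t) "") (nodes.getD (i - t - 1) "") = 1) := by
          intro ⟨_, h2, h3⟩
          apply hc
          rw [h1] at h2
          rw [h1, hit] at h3
          exact ⟨by rw [fd_symm]; exact h3, by rw [hg]; exact h2⟩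
        rw [dif_neg hcond]
        have hr : rfun nodes goal (j + 1) = 0 := by
          simp only [rfun]; rw [if_neg hc]
        simp [hr, desc]

-- the drop/take slice is the reversed backward chain plus the anchor
lemma slice_eq (nodes : List String) :
    ∀ (r i : Nat), r ≤ i → i < nodes.length →
      (nodes.drop (i - r)).take (r + 1) =
        (desc nodes i r).reverse ++ [nodes.getD i ""] := by
  intro r
  induction r with
  | zero =>
      intro i _ hi
      rw [Nat.sub_zero, List.take_succ]
      simp [List.getElem?_drop, List.getElem?_eq_getElem hi,
        List.getD_eq_getElem _ _ hi, desc]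
  | succ r ih =>
      intro i hr hi
      have h1 : i - (r + 1) = i - 1 - r := by omega
      rw [List.take_succ, List.getElem?_drop]
      have h2 : i - (r + 1) + (r + 1) = i := by omega
      rw [h2, List.getElem?_eq_getElem hi, h1,
        ih (i - 1) (by omega) (by omega)]
      simp only [desc, List.reverse_cons, Option.toList_some, List.append_assoc]
      rw [List.getD_eq_getElem _ _ hi]

-- the common fold both programs reduce to
def F (nodes : List String) (goal : String) (thresh : Int)
    (seqs : List (List String)) (j : Nat) : List (List String) :=
  if nodes.getD j "" = goal ∧ ((rfun nodes goal j : Int) + 1 > thresh + 1) then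
    seqs ++ [(nodes.drop (j - rfun nodes goal j)).take (rfun nodes goal j + 1)]
  else seqs

lemma getD_g (nodes : List String) (goal : String) (j : Nat) (hj : j < nodes.length) :
    (nodes.map (fun x => find_distance_bn_nodes goal x)).getD j 0 = gD nodes goal j := by
  rw [List.getD_eq_getElem _ _ (by simpa using hj), List.getElem_map, gD,
    List.getD_eq_getElem _ _ hj]

lemma getD_c (nodes : List String) (j : Nat) (hj : j < nodes.length - 1) :
    ((List.range (nodes.length - 1)).map
      (fun j => find_distance_bn_nodes (nodes.getD j "") (nodes.getD (j + 1) ""))).getD j 0 =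
      find_distance_bn_nodes (nodes.getD j "") (nodes.getD (j + 1) "") := by
  rw [List.getD_eq_getElem _ _ (by simpa using hj), List.getElem_map, List.getElem_range]

-- B's fold invariant: after the first m indices the DP register is rfun (m-1)
lemma B_fold (nodes : List String) (goal : String) (thresh : Int) :
    ∀ (m : Nat), m ≤ nodes.length → ∀ (s0 : List (List String)),
      ((List.range m).foldl
        (fun (st : Nat × List (List String)) j =>
          let r := if 0 < j ∧
              ((List.range (nodes.length - 1)).map
                (fun j => find_distance_bn_nodes (nodes.getD j "") (nodes.getD (j + 1) ""))).getD (j - 1) 0 = 1 ∧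
              (nodes.map (fun x => find_distance_bn_nodes goal x)).getD (j - 1) 0 =
                (nodes.map (fun x => find_distance_bn_nodes goal x)).getD j 0 + 1
            then st.1 + 1 else 0
          let seqs := if nodes.getD j "" = goal ∧ ((r : Int) + 1 > thresh + 1) then
              st.2 ++ [(nodes.drop (j - r)).take (r + 1)]
            else st.2
          (r, seqs)) (0, s0)) =
      (rfun nodes goal (m - 1), (List.range m).foldl (F nodes goal thresh) s0) := by
  intro m
  induction m with
  | zero => intro _ s0; simp [rfun]
  | succ m ih =>
      intro hm s0
      rw [List.range_succ, List.foldl_append, List.foldl_append, ih (by omega) s0]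
      simp only [List.foldl_cons, List.foldl_nil]
      have hrm : (if 0 < m ∧
          ((List.range (nodes.length - 1)).map
            (fun j => find_distance_bn_nodes (nodes.getD j "") (nodes.getD (j + 1) ""))).getD (m - 1) 0 = 1 ∧
          (nodes.map (fun x => find_distance_bn_nodes goal x)).getD (m - 1) 0 =
            (nodes.map (fun x => find_distance_bn_nodes goal x)).getD m 0 + 1
          then rfun nodes goal (m - 1) + 1 else 0) = rfun nodes goal m := by
        cases m with
        | zero => simp [rfun]
        | succ k =>
            have hk1 : k < nodes.length - 1 := by omega
            have hk : k < nodes.length := by omega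
            have hk2 : k + 1 < nodes.length := by omega
            simp only [Nat.add_sub_cancel]
            rw [getD_c nodes k hk1, getD_g nodes goal k hk, getD_g nodes goal (k + 1) hk2]
            simp only [rfun]
            by_cases hc : find_distance_bn_nodes (nodes.getD k "") (nodes.getD (k + 1) "") = 1 ∧
                gD nodes goal k = gD nodes goal (k + 1) + 1
            · rw [if_pos ⟨Nat.succ_pos k, hc.1, hc.2⟩, if_pos hc]
            · rw [if_neg (by rintro ⟨_, h1, h2⟩; exact hc ⟨h1, h2⟩), if_neg hc]
      simp only [hrm, F, Nat.add_sub_cancel]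

lemma B_eq (nodes : List String) (goal : String) (thresh : Int) :
    get_runs_to_goal_alt nodes goal thresh =
      (List.range nodes.length).foldl (F nodes goal thresh) [] := by
  show ((List.range nodes.length).foldl
        (fun (st : Nat × List (List String)) j =>
          let r := if 0 < j ∧
              ((List.range (nodes.length - 1)).map
                (fun j => find_distance_bn_nodes (nodes.getD j "") (nodes.getD (j + 1) ""))).getD (j - 1) 0 = 1 ∧
              (nodes.map (fun x => find_distance_bn_nodes goal x)).getD (j - 1) 0 =
                (nodes.map (fun x => find_distance_bn_nodes goal x)).getD j 0 + 1
            then st.1 + 1 else 0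
          let seqs := if nodes.getD j "" = goal ∧ ((r : Int) + 1 > thresh + 1) then
              st.2 ++ [(nodes.drop (j - r)).take (r + 1)]
            else st.2
          (r, seqs)) (0, [])).2 = _
  rw [B_fold nodes goal thresh nodes.length le_rfl []]

lemma enum_eq :
    ∀ (xs : List String) (s : Nat),
      PySem.List.enumerate xs (s : Int) =
        (List.range xs.length).map (fun u => (((s + u : Nat) : Int), xs.getD u "")) := by
  intro xs
  induction xs with
  | nil => intro s; simp [PySem.List.enumerate_nil]
  | cons x xs ih =>
      intro s
      rw [PySem.List.enumerate_cons]
      have : ((s : Int) + 1) = ((s + 1 : Nat) : Int) := by push_cast; ring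
      rw [this, ih (s + 1)]
      rw [List.length_cons, List.range_succ_eq_map, List.map_cons, List.map_map]
      simp only [Nat.add_zero, List.getD_cons_zero]
      congr 1
      apply List.map_congr_left
      intro u _
      simp only [Function.comp, List.getD_cons_succ]
      congr 2
      omega

lemma foldl_congr' {α β : Type} : ∀ (l : List β) (f g : α → β → α),
    (∀ a, ∀ x ∈ l, f a x = g a x) → ∀ a, l.foldl f a = l.foldl g a := by
  intro l
  induction l with
  | nil => intro f g h a; rfl
  | cons x xs ih =>
      intro f g h a
      rw [List.foldl_cons, List.foldl_cons, h a x List.mem_cons_self]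
      exact ih f g (fun a y hy => h a y (List.mem_cons_of_mem _ hy)) _

lemma A_eq (nodes : List String) (goal : String) (thresh : Int) :
    get_runs_to_goal nodes goal thresh =
      (List.range nodes.length).foldl (F nodes goal thresh) [] := by
  unfold get_runs_to_goal
  rw [show (0 : Int) = ((0 : Nat) : Int) from rfl, enum_eq, List.foldl_map]
  apply foldl_congr'
  intro seqs i hi
  rw [List.mem_range] at hi
  simp only [Nat.zero_add, Int.toNat_natCast, F]
  by_cases heq : nodes.getD i "" = goal
  · rw [if_pos heq]
    have hg0 : gD nodes goal i = ((0 : Nat) : Int) := by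
      rw [gD, heq, fd_self]; rfl
    rw [heq, aRun_eq nodes goal i 0 i [goal] (by omega) hg0]
    have hlen : (([goal] ++ desc nodes i (rfun nodes goal i)).reverse.length : Int) =
        (rfun nodes goal i : Int) + 1 := by
      simp [desc_length]
    simp only [hlen]
    by_cases ht : (rfun nodes goal i : Int) + 1 > thresh + 1
    · rw [if_pos ht, if_pos ⟨trivial, ht⟩]
      rw [slice_eq nodes (rfun nodes goal i) i (rfun_le nodes goal i) hi, heq]
      simp
    · rw [if_neg ht, if_neg (by rintro ⟨_, h⟩; exact ht h)]
  · rw [if_neg heq, if_neg (by rintro ⟨h, _⟩; exact heq h)]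

-- ===== VERDICT (by name: the statement is the Claim_ definition above) =====
theorem get_runs_to_goal_spec : Claim_equal_get_runs_to_goal := by
  intro nodes goal thresh _
  show get_runs_to_goal nodes goal thresh = get_runs_to_goal_alt nodes goal thresh
  rw [A_eq, B_eq]
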